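-- pv_equiv track=rewrite | github.com/DongYun666/leetcode | 2289.使数组按非递减顺序排列.py | totalSteps1
-- ===== SOURCE A (Python) =====
-- from typing import List
--
-- def totalSteps1(nums: List[int]) -> int:
--     res = 0
--     while sum(nums[i-1]>nums[i] for i in range(1,len(nums))):
--         temp = [nums[0]]
--         for i in range(1,len(nums)):
--             if nums[i-1]>nums[i]:
--                 continue
--             else:
--                 temp.append(nums[i])
--         nums = temp[:]
--         res+=1
--     return res
-- ===== SOURCE B (Python) =====
-- from typing import List
--
-- def totalSteps1(nums: List[int]) -> int:
--     # Monotonic stack: for each element compute the round in which it is removed;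
--     # the answer is the maximum removal round, in a single scan.
--     stack = []  # pairs (value, removal round; 0 = never removed)
--     res = 0
--     for x in nums:
--         t = 0
--         while stack and stack[-1][0] <= x:
--             t = max(t, stack.pop()[1])
--         t = t + 1 if stack else 0
--         stack.append((x, t))
--         res = max(res, t)
--     return res
-- ===== Notes on version B (the rewrite author's own statement) =====
-- stated objective: alternative
-- what changed: Replaced the repeated removal passes (re-scanning and rebuilding the array each round until it is non-decreasing) by a single left-to-right monotonic-stack scan that computes each element's removal round directly and returns the maximum.
import Mathlib
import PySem

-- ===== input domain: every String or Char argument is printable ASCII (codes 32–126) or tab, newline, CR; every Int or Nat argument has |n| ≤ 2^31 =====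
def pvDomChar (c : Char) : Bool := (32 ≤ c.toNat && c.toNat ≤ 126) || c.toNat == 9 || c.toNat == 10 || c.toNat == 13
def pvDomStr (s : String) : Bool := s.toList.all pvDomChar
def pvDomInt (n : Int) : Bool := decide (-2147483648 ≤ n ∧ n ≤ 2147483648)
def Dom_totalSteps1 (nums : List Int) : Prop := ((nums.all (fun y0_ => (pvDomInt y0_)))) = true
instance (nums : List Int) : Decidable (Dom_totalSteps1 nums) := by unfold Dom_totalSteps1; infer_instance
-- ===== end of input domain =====

-- B replaces A's repeated removal passes by one monotonic-stack scan computing each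
-- element's removal round; equivalence of the return values is proved below.

-- ===== PORT A =====
-- sum(nums[i-1] > nums[i] for i in range(1, len(nums))): fold over adjacent pairs
def descSum : List Int → Int
  | a :: b :: tl => (if a > b then (1 : Int) else 0) + descSum (b :: tl)
  | _ => 0

-- body of the for-loop: keep nums[i] unless nums[i-1] > nums[i] (prev = original neighbour)
def passTail (prev : Int) : List Int → List Int
  | [] => []
  | x :: tl => if prev > x then passTail x tl else x :: passTail x tl

-- temp = [nums[0]] followed by the kept elements
def passA : List Int → List Int
  | [] => []
  | h :: tl => h :: passTail h tl

-- termination facts for the while loop (cited by the port's decreasing_by)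
theorem passTail_length_le (prev : Int) (tl : List Int) :
    (passTail prev tl).length ≤ tl.length := by
  induction tl generalizing prev with
  | nil => simp [passTail]
  | cons x tl ih =>
    simp only [passTail]
    split
    · exact Nat.le_succ_of_le (ih x)
    · simpa using Nat.succ_le_succ (ih x)

theorem passTail_length_lt (prev : Int) (tl : List Int)
    (h : descSum (prev :: tl) ≠ 0) : (passTail prev tl).length < tl.length := by
  induction tl generalizing prev with
  | nil => simp [descSum] at h
  | cons x tl ih =>
    simp only [passTail]
    by_cases hpx : prev > x
    · simp only [hpx, if_true]
      exact Nat.lt_succ_of_le (passTail_length_le x tl)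
    · simp only [hpx, if_false, List.length_cons]
      have hx : descSum (x :: tl) ≠ 0 := by
        simp only [descSum, if_neg hpx, zero_add] at h
        exact h
      exact Nat.succ_lt_succ (ih x hx)

theorem passA_length_lt (nums : List Int) (h : descSum nums ≠ 0) :
    (passA nums).length < nums.length := by
  cases nums with
  | nil => simp [descSum] at h
  | cons a tl =>
    simp only [passA, List.length_cons]
    exact Nat.succ_lt_succ (passTail_length_lt a tl h)

-- while sum(...) : rebuild and count one round; res = number of rounds
def totalSteps1 (nums : List Int) : Int :=
  if h : descSum nums ≠ 0 then 1 + totalSteps1 (passA nums) else 0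
termination_by nums.length
decreasing_by exact passA_length_lt nums h

-- ===== PORT B =====
-- while stack and stack[-1][0] <= x: t = max(t, stack.pop()[1])   (stack head = top)
def popAll (x : Int) : List (Int × Int) → Int → Int × List (Int × Int)
  | [], t => (t, [])
  | (v, tv) :: rest, t => if v ≤ x then popAll x rest (max t tv) else (t, (v, tv) :: rest)

-- one iteration of the for-loop, state = (stack, res)
def stepB (s : List (Int × Int) × Int) (x : Int) : List (Int × Int) × Int :=
  let p := popAll x s.1 0
  let t : Int := if p.2 = [] then 0 else p.1 + 1
  ((x, t) :: p.2, max s.2 t)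

def totalSteps1_alt (nums : List Int) : Int := (nums.foldl stepB ([], 0)).2

-- ===== PRECONDITION & SPEC =====
def Spec_totalSteps1 (nums : List Int) (out : Int) : Prop := out = totalSteps1_alt nums
instance (nums : List Int) (out : Int) : Decidable (Spec_totalSteps1 nums out) := by unfold Spec_totalSteps1; infer_instance

-- ===== CLAIM (what is proved, stated in full; the proofs are below) =====
def Claim_equal_totalSteps1 : Prop := ∀ (nums : List Int), Dom_totalSteps1 nums → Spec_totalSteps1 nums (totalSteps1 nums)

-- ===== LEMMAS AND PROOFS =====

-- `dec S`: the stack one removal round later: round-1 elements disappear, othersage by one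
def dec (S : List (Int × Int)) : List (Int × Int) :=
  S.filterMap (fun p => if p.2 = 1 then none else some (p.1, max (p.2 - 1) 0))

-- stack invariant: values strictly increase top→bottom, only the bottom has round 0
def StkInv (S : List (Int × Int)) : Prop :=
  S.Pairwise (fun a b => a.1 < b.1) ∧ (∀ p ∈ S.dropLast, 1 ≤ p.2) ∧
    (∀ p, S.getLast? = some p → p.2 = 0)

theorem popAll_cons_le (x v tv : Int) (rest : List (Int × Int)) (a : Int)
    (h : v ≤ x) : popAll x ((v, tv) :: rest) a = popAll x rest (max a tv) := by
  simp only [popAll, if_pos h]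

theorem popAll_cons_gt (x v tv : Int) (rest : List (Int × Int)) (a : Int)
    (h : ¬ v ≤ x) : popAll x ((v, tv) :: rest) a = (a, (v, tv) :: rest) := by
  simp only [popAll, if_neg h]

theorem popAll_acc_le (x : Int) (S : List (Int × Int)) (a : Int) :
    a ≤ (popAll x S a).1 := by
  induction S generalizing a with
  | nil => simp [popAll]
  | cons p rest ih =>
    obtain ⟨v, tv⟩ := p
    simp only [popAll]
    split
    · exact le_trans (le_max_left a tv) (ih _)
    · simp

theorem popAll_suffix (x : Int) (S : List (Int × Int)) (a : Int) :
    ∃ pre, S = pre ++ (popAll x S a).2 ∧ ∀ p ∈ pre, p.1 ≤ x := by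
  induction S generalizing a with
  | nil => exact ⟨[], by simp [popAll]⟩
  | cons p rest ih =>
    obtain ⟨v, tv⟩ := p
    simp only [popAll]
    split
    · obtain ⟨pre, hpre, hle⟩ := ih (max a tv)
      refine ⟨(v, tv) :: pre, by simpa using hpre, ?_⟩
      intro q hq
      rcases List.mem_cons.mp hq with h | h
      · subst h; assumption
      · exact hle q h
    · exact ⟨[], by simp, by simp⟩

theorem popAll_rem_head (x : Int) (S : List (Int × Int)) (a : Int)
    (q : Int × Int) (hq : (popAll x S a).2.head? = some q) : x < q.1 := by
  induction S generalizing a with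
  | nil => simp [popAll] at hq
  | cons p rest ih =>
    obtain ⟨v, tv⟩ := p
    simp only [popAll] at hq
    split at hq
    · exact ih _ hq
    · simp at hq
      subst hq
      omega

theorem popAll_stop (x : Int) (S : List (Int × Int)) (a : Int)
    (h : ∀ q ∈ S, x < q.1) : popAll x S a = (a, S) := by
  cases S with
  | nil => simp [popAll]
  | cons p rest =>
    obtain ⟨v, tv⟩ := p
    have := h (v, tv) (by simp)
    simp only [popAll]
    rw [if_neg (by omega)]

theorem mem_dec (S : List (Int × Int)) (q : Int × Int) (hq : q ∈ dec S) :
    ∃ p ∈ S, p.1 = q.1 := by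
  simp only [dec, List.mem_filterMap] at hq
  obtain ⟨p, hp, hpq⟩ := hq
  split at hpq
  · simp at hpq
  · refine ⟨p, hp, ?_⟩
    cases hpq
    rfl

theorem popAll_rem_nil_dec (x : Int) (S : List (Int × Int)) (a b : Int)
    (h : (popAll x S a).2 = []) : (popAll x (dec S) b).2 = [] := by
  induction S generalizing a b with
  | nil => simp [dec, popAll]
  | cons p rest ih =>
    obtain ⟨v, tv⟩ := p
    simp only [popAll] at h
    by_cases hv : v ≤ x
    · rw [if_pos hv] at h
      by_cases htv : tv = 1
      · simp only [dec, List.filterMap_cons, htv]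
        exact ih _ b h
      · simp only [dec, List.filterMap_cons, if_neg htv]
        simp only [popAll, if_pos hv]
        exact ih _ _ h
    · rw [if_neg hv] at h
      simp at h

theorem popAll_dec (x : Int) (S : List (Int × Int)) (a : Int)
    (hPW : S.Pairwise (fun a b => a.1 < b.1))
    (hdl : ∀ p ∈ S.dropLast, 1 ≤ p.2)
    (hlast : ∀ p, S.getLast? = some p → p.2 = 0)
    (hrem : (popAll x S a).2 ≠ []) :
    popAll x (dec S) (max (a - 1) 0) =
      (max ((popAll x S a).1 - 1) 0, dec ((popAll x S a).2)) := by
  induction S generalizing a with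
  | nil => simp [popAll] at hrem
  | cons p rest ih =>
    obtain ⟨v, tv⟩ := p
    rw [List.pairwise_cons] at hPW
    obtain ⟨hv_lt, hPW'⟩ := hPW
    by_cases hv : v ≤ x
    · rw [popAll_cons_le x v tv rest a hv] at hrem ⊢
      have hrest : rest ≠ [] := by
        intro hnil
        rw [hnil] at hrem
        simp [popAll] at hrem
      obtain ⟨y, rest', rfl⟩ := List.exists_cons_of_ne_nil hrest
      have htv1 : 1 ≤ tv := hdl (v, tv) (by simp)
      have hdl' : ∀ p ∈ (y :: rest').dropLast, 1 ≤ p.2 := by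
        intro p hp
        exact hdl p (by simpa using Or.inr hp)
      have hlast' : ∀ p, (y :: rest').getLast? = some p → p.2 = 0 := by
        intro p hp
        exact hlast p (by simpa using hp)
      by_cases htv : tv = 1
      · subst htv
        have hdecS : dec ((v, 1) :: y :: rest') = dec (y :: rest') := by
          simp [dec]
        rw [hdecS]
        have := ih hPW' hdl' hlast' (a := max a 1) hrem
        rw [show max (max a 1 - 1) 0 = max (a - 1) 0 by omega] at this
        exact this
      · have hdecS : dec ((v, tv) :: y :: rest') = (v, max (tv - 1) 0) :: dec (y :: rest') := by
          simp [dec, htv]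
        rw [hdecS, popAll_cons_le x v (max (tv - 1) 0) _ _ hv]
        have := ih hPW' hdl' hlast' (a := max a tv) hrem
        rw [show max (max (a - 1) 0) (max (tv - 1) 0) = max (max a tv - 1) 0 by omega]
        exact this
    · rw [popAll_cons_gt x v tv rest a hv]
      refine popAll_stop x _ _ ?_
      intro q hq
      obtain ⟨p, hp, hpq⟩ := mem_dec _ q hq
      rcases List.mem_cons.mp hp with h | h
      · subst h
        simp at hpq
        omega
      · have := hv_lt p h
        omega

-- new-element round as computed by one stepB iteration
def tB (S : List (Int × Int)) (x : Int) : Int :=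
  if (popAll x S 0).2 = [] then 0 else (popAll x S 0).1 + 1

theorem stepB_def (S : List (Int × Int)) (r x : Int) :
    stepB (S, r) x = ((x, tB S x) :: (popAll x S 0).2, max r (tB S x)) := rfl

theorem rem_gt (x : Int) (S : List (Int × Int)) (a : Int)
    (hPW : S.Pairwise (fun a b => a.1 < b.1)) :
    ∀ q ∈ (popAll x S a).2, x < q.1 := by
  obtain ⟨pre, hS, -⟩ := popAll_suffix x S a
  have hrem : ((popAll x S a).2).Pairwise (fun a b => a.1 < b.1) :=
    (List.pairwise_append.mp (hS ▸ hPW)).2.1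
  intro q hq
  cases hrm : (popAll x S a).2 with
  | nil => rw [hrm] at hq; simp at hq
  | cons q0 rem' =>
    have hq0 : x < q0.1 := popAll_rem_head x S a q0 (by rw [hrm]; rfl)
    rw [hrm] at hq hrem
    rcases List.mem_cons.mp hq with h | h
    · subst h; exact hq0
    · exact lt_trans hq0 ((List.pairwise_cons.mp hrem).1 q h)

theorem rem_last (x : Int) (S : List (Int × Int)) (a : Int)
    (hlast : ∀ p, S.getLast? = some p → p.2 = 0) (hne : (popAll x S a).2 ≠ []) :
    ∀ p, ((popAll x S a).2).getLast? = some p → p.2 = 0 := by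
  obtain ⟨pre, hS, -⟩ := popAll_suffix x S a
  intro p hp
  exact hlast p (by rw [hS, List.getLast?_append_of_ne_nil pre hne, hp])

theorem rem_dropLast (x : Int) (S : List (Int × Int)) (a : Int)
    (hdl : ∀ p ∈ S.dropLast, 1 ≤ p.2) (hne : (popAll x S a).2 ≠ []) :
    ∀ p ∈ ((popAll x S a).2).dropLast, 1 ≤ p.2 := by
  obtain ⟨pre, hS, -⟩ := popAll_suffix x S a
  intro p hp
  refine hdl p ?_
  rw [hS, List.dropLast_append_of_ne_nil hne, List.mem_append]
  exact Or.inr hp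

theorem dec_ne_nil (rem : List (Int × Int)) (hne : rem ≠ [])
    (h0 : ∀ p, rem.getLast? = some p → p.2 = 0) : dec rem ≠ [] := by
  have hmem : rem.getLast hne ∈ rem := List.getLast_mem hne
  have h00 : (rem.getLast hne).2 = 0 := h0 _ (List.getLast?_eq_getLast_of_ne_nil hne)
  refine List.ne_nil_of_mem (a := ((rem.getLast hne).1, max ((rem.getLast hne).2 - 1) 0)) ?_
  exact List.mem_filterMap.mpr ⟨rem.getLast hne, hmem, by rw [if_neg (by omega)]⟩

theorem stepB_inv (S : List (Int × Int)) (x : Int) (h : StkInv S) :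
    StkInv ((x, tB S x) :: (popAll x S 0).2) := by
  obtain ⟨hPW, hdl, hlast⟩ := h
  have hgt := rem_gt x S 0 hPW
  obtain ⟨pre, hS, -⟩ := popAll_suffix x S 0
  have hremPW : ((popAll x S 0).2).Pairwise (fun a b => a.1 < b.1) :=
    (List.pairwise_append.mp (hS ▸ hPW)).2.1
  refine ⟨List.pairwise_cons.mpr ⟨hgt, hremPW⟩, ?_, ?_⟩
  · cases hrm : (popAll x S 0).2 with
    | nil => simp [tB, hrm]
    | cons q0 rem' =>
      have ht0 : 0 ≤ (popAll x S 0).1 := popAll_acc_le x S 0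
      have htB : tB S x = (popAll x S 0).1 + 1 := by simp [tB, hrm]
      rw [← hrm, List.dropLast_cons_of_ne_nil (by rw [hrm]; exact List.cons_ne_nil _ _)]
      intro p hp
      rcases List.mem_cons.mp hp with hh | hh
      · subst hh; omega
      · exact rem_dropLast x S 0 hdl (by rw [hrm]; exact List.cons_ne_nil _ _) p hh
  · cases hrm : (popAll x S 0).2 with
    | nil => simp [tB, hrm]
    | cons q0 rem' =>
      intro p hp
      rw [List.getLast?_cons_cons] at hp
      exact rem_last x S 0 hlast (by rw [hrm]; exact List.cons_ne_nil _ _) p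
        (by rw [hrm]; exact hp)

theorem stepB_drop (prev tp : Int) (S₀ : List (Int × Int)) (r x : Int)
    (hx : ¬ prev ≤ x) :
    stepB ((prev, tp) :: S₀, r) x = ((x, 1) :: (prev, tp) :: S₀, max r 1) := by
  rw [stepB_def]
  rw [show popAll x ((prev, tp) :: S₀) 0 = (0, (prev, tp) :: S₀) from popAll_cons_gt x prev tp S₀ 0 hx]
  have htB : tB ((prev, tp) :: S₀) x = 1 := by
    simp [tB, popAll_cons_gt x prev tp S₀ 0 hx]
  rw [htB]

theorem stepB_keep (prev tp : Int) (S₀ : List (Int × Int)) (r r' x : Int)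
    (h : StkInv ((prev, tp) :: S₀)) (hx : prev ≤ x) (hr' : r' = max (r - 1) 0) :
    stepB (dec ((prev, tp) :: S₀), r') x =
      (dec ((x, tB ((prev, tp) :: S₀) x) :: (popAll x ((prev, tp) :: S₀) 0).2),
       max (max r (tB ((prev, tp) :: S₀) x) - 1) 0) := by
  obtain ⟨hPW, hdl, hlast⟩ := h
  rw [stepB_def]
  cases hrm : (popAll x ((prev, tp) :: S₀) 0).2 with
  | nil =>
    have hrm' : (popAll x (dec ((prev, tp) :: S₀)) 0).2 = [] :=
      popAll_rem_nil_dec x _ 0 0 hrm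
    have htB : tB ((prev, tp) :: S₀) x = 0 := by simp [tB, hrm]
    have htB' : tB (dec ((prev, tp) :: S₀)) x = 0 := by simp [tB, hrm']
    rw [htB, htB', hrm']
    have : dec [(x, 0)] = [(x, 0)] := by simp [dec]
    rw [this]
    simp only [Prod.mk.injEq]
    refine ⟨trivial, by omega⟩
  | cons q0 rem' =>
    have hne : (popAll x ((prev, tp) :: S₀) 0).2 ≠ [] := by
      rw [hrm]; exact List.cons_ne_nil _ _
    have hpd := popAll_dec x ((prev, tp) :: S₀) 0 hPW hdl hlast hne
    rw [show max ((0 : Int) - 1) 0 = 0 by omega] at hpd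
    have ht0 : 0 ≤ (popAll x ((prev, tp) :: S₀) 0).1 := popAll_acc_le x _ 0
    -- prev is popped, S₀ ≠ [], so tp ≥ 1 and the accumulated round is ≥ 1
    have hS₀ : S₀ ≠ [] := by
      intro hnil
      subst hnil
      rw [popAll_cons_le x prev tp [] 0 hx] at hne
      simp [popAll] at hne
    have htp : 1 ≤ tp := hdl (prev, tp) (by rw [List.dropLast_cons_of_ne_nil hS₀]; simp)
    have ht1 : 1 ≤ (popAll x ((prev, tp) :: S₀) 0).1 := by
      rw [popAll_cons_le x prev tp S₀ 0 hx]
      have := popAll_acc_le x S₀ (max 0 tp)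
      omega
    have hdne : dec (popAll x ((prev, tp) :: S₀) 0).2 ≠ [] :=
      dec_ne_nil _ hne (rem_last x _ 0 hlast hne)
    have htB : tB ((prev, tp) :: S₀) x = (popAll x ((prev, tp) :: S₀) 0).1 + 1 := by
      simp [tB, hrm]
    have htB' : tB (dec ((prev, tp) :: S₀)) x = (popAll x ((prev, tp) :: S₀) 0).1 := by
      simp only [tB, hpd]
      rw [if_neg hdne]
      omega
    rw [htB, htB']
    have hdeccons :
        dec ((x, (popAll x ((prev, tp) :: S₀) 0).1 + 1) :: (popAll x ((prev, tp) :: S₀) 0).2) =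
          (x, (popAll x ((prev, tp) :: S₀) 0).1) :: dec (popAll x ((prev, tp) :: S₀) 0).2 := by
      simp only [dec, List.filterMap_cons]
      rw [if_neg (by omega : ¬ ((x, (popAll x ((prev, tp) :: S₀) 0).1 + 1).2 = 1))]
      simp
      omega
    rw [← hrm, hdeccons]
    simp only [Prod.mk.injEq]
    refine ⟨by rw [hpd], by omega⟩

theorem fold_dec (tl : List Int) : ∀ (prev tp : Int) (S₀ : List (Int × Int)) (r r' : Int),
    StkInv ((prev, tp) :: S₀) → 0 ≤ r → r' = max (r - 1) 0 →
    List.foldl stepB (dec ((prev, tp) :: S₀), r') (passTail prev tl) =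
      (dec ((List.foldl stepB ((prev, tp) :: S₀, r) tl).1),
       max ((List.foldl stepB ((prev, tp) :: S₀, r) tl).2 - 1) 0) := by
  induction tl with
  | nil =>
    intro prev tp S₀ r r' hInv hr hr'
    simp only [passTail, List.foldl_nil]
    rw [hr']
  | cons x tl ih =>
    intro prev tp S₀ r r' hInv hr hr'
    by_cases hx : prev > x
    · -- x is removed this round: A-side pushes (x,1); dec-side skips x entirely
      have hnle : ¬ prev ≤ x := by omega
      simp only [passTail, if_pos hx, List.foldl_cons]
      rw [stepB_drop prev tp S₀ r x hnle]
      have hInv' : StkInv ((x, 1) :: (prev, tp) :: S₀) := by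
        obtain ⟨hPW, hdl, hlast⟩ := hInv
        refine ⟨List.pairwise_cons.mpr ⟨?_, hPW⟩, ?_, ?_⟩
        · intro b hb
          rcases List.mem_cons.mp hb with hh | hh
          · subst hh; omega
          · have := (List.pairwise_cons.mp hPW).1 b hh
            omega
        · rw [List.dropLast_cons_of_ne_nil (List.cons_ne_nil _ _)]
          intro p hp
          rcases List.mem_cons.mp hp with hh | hh
          · subst hh; omega
          · exact hdl p hh
        · intro p hp
          rw [List.getLast?_cons_cons] at hp
          exact hlast p hp
      have hdec : dec ((x, 1) :: (prev, tp) :: S₀) = dec ((prev, tp) :: S₀) := by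
        simp [dec]
      have := ih x 1 ((prev, tp) :: S₀) (max r 1) r' hInv' (by omega) (by omega)
      rw [hdec] at this
      exact this
    · -- x survives this round: both runs process x
      have hle : prev ≤ x := by omega
      simp only [passTail, if_neg hx, List.foldl_cons]
      rw [stepB_keep prev tp S₀ r r' x hInv hle hr']
      rw [stepB_def]
      exact ih x (tB ((prev, tp) :: S₀) x) (popAll x ((prev, tp) :: S₀) 0).2
        (max r (tB ((prev, tp) :: S₀) x)) _
        (stepB_inv ((prev, tp) :: S₀) x hInv)
        (by have := popAll_acc_le x ((prev, tp) :: S₀) 0; simp [tB]; split <;> omega) rfl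

theorem res_mono (tl : List Int) : ∀ (S : List (Int × Int)) (r : Int),
    r ≤ (List.foldl stepB (S, r) tl).2 := by
  induction tl with
  | nil => intro S r; simp
  | cons x tl ih =>
    intro S r
    rw [List.foldl_cons, stepB_def]
    exact le_trans (le_max_left r (tB S x)) (ih _ _)

theorem descent_one (tl : List Int) : ∀ (prev tp : Int) (S₀ : List (Int × Int)) (r : Int),
    descSum (prev :: tl) ≠ 0 →
    1 ≤ (List.foldl stepB ((prev, tp) :: S₀, r) tl).2 := by
  induction tl with
  | nil => intro prev tp S₀ r h; simp [descSum] at h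
  | cons x tl ih =>
    intro prev tp S₀ r h
    by_cases hx : prev > x
    · rw [List.foldl_cons, stepB_drop prev tp S₀ r x (by omega)]
      exact le_trans (le_max_right r 1) (res_mono tl _ _)
    · have hd : descSum (x :: tl) ≠ 0 := by
        simp only [descSum, if_neg hx, zero_add] at h
        exact h
      rw [List.foldl_cons, stepB_def]
      exact ih x _ _ _ hd

theorem descSum_nonneg : ∀ l : List Int, 0 ≤ descSum l := by
  intro l
  induction l with
  | nil => simp [descSum]
  | cons a tl ih =>
    cases tl with
    | nil => simp [descSum]
    | cons b tl' =>
      simp only [descSum]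
      split <;> omega

theorem sorted_fold (tl : List Int) : ∀ (prev r : Int),
    descSum (prev :: tl) = 0 → 0 ≤ r →
    (List.foldl stepB ([(prev, 0)], r) tl).2 = r := by
  induction tl with
  | nil => intro prev r _ _; simp
  | cons x tl ih =>
    intro prev r h hr
    by_cases hx : prev > x
    · have := descSum_nonneg (x :: tl)
      simp only [descSum, if_pos hx] at h
      omega
    · have hd : descSum (x :: tl) = 0 := by
        simp only [descSum, if_neg hx, zero_add] at h
        exact h
      rw [List.foldl_cons, stepB_def]
      have hpop : popAll x [(prev, 0)] 0 = (0, []) := by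
        rw [popAll_cons_le x prev 0 [] 0 (by omega)]
        simp [popAll]
      have htB : tB [(prev, 0)] x = 0 := by simp [tB, hpop]
      rw [htB, hpop, max_eq_left hr]
      exact ih x r hd hr

theorem alt_cons (h : Int) (tl : List Int) :
    totalSteps1_alt (h :: tl) = (List.foldl stepB ([(h, 0)], 0) tl).2 := by
  simp only [totalSteps1_alt, List.foldl_cons]
  rw [stepB_def]
  have hpop : popAll h ([] : List (Int × Int)) 0 = (0, []) := rfl
  have htB : tB [] h = 0 := by simp [tB, hpop]
  rw [htB, hpop, max_self]

theorem StkInv_singleton (z : Int) : StkInv [(z, 0)] := by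
  refine ⟨by simp, by simp, ?_⟩
  intro p hp
  simp at hp
  subst hp
  rfl

theorem AB : ∀ (n : ℕ) (nums : List Int), nums.length < n →
    totalSteps1 nums = totalSteps1_alt nums := by
  intro n
  induction n with
  | zero => intro nums h; exact absurd h (Nat.not_lt_zero _)
  | succ n ih =>
    intro nums hlen
    by_cases h : descSum nums = 0
    · rw [totalSteps1, dif_neg (by simpa using h)]
      cases nums with
      | nil => simp [totalSteps1_alt]
      | cons h₀ tl =>
        rw [alt_cons, sorted_fold tl h₀ 0 h le_rfl]
    · have hlt : (passA nums).length < n := by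
        have := passA_length_lt nums h
        omega
      rw [totalSteps1, dif_pos h, ih (passA nums) hlt]
      cases nums with
      | nil => simp [descSum] at h
      | cons h₀ tl =>
        have hfd := fold_dec tl h₀ 0 [] 0 0 (StkInv_singleton h₀) le_rfl (by omega)
        have hdec1 : dec [(h₀, 0)] = [(h₀, 0)] := by simp [dec]
        rw [hdec1] at hfd
        have h1 : 1 ≤ (List.foldl stepB ([(h₀, 0)], 0) tl).2 :=
          descent_one tl h₀ 0 [] 0 h
        have hpa : passA (h₀ :: tl) = h₀ :: passTail h₀ tl := rfl
        rw [hpa, alt_cons, alt_cons, hfd]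
        omega

theorem totalSteps1_spec : Claim_equal_totalSteps1 := by
  intro nums _
  unfold Spec_totalSteps1
  exact AB (nums.length + 1) nums (Nat.lt_succ_self _)
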